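-- pv_equiv track=rewrite | github.com/pozdnyavladimer-jpg/gitcube-lab | apps/graph_school/env.py | _count_cycle_nodes
-- ===== SOURCE A (Python) =====
-- from typing import Dict, List, Tuple, Set
-- from collections import defaultdict
--
-- def _count_cycle_nodes(nodes: List[str], edges: List[Tuple[str, str]]) -> int:
--     adj = defaultdict(list)
--     for u, v in edges:
--         adj[u].append(v)
--
--     visited: Set[str] = set()
--     stack: Set[str] = set()
--     in_cycle: Set[str] = set()
--     parent: Dict[str, str] = {}
--
--     def dfs(u: str):
--         visited.add(u)
--         stack.add(u)
--         for v in adj[u]: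
--             if v not in visited:
--                 parent[v] = u
--                 dfs(v)
--             elif v in stack:
--                 cur = u
--                 in_cycle.add(v)
--                 while cur != v and cur in parent:
--                     in_cycle.add(cur)
--                     cur = parent[cur]
--                 in_cycle.add(cur)
--         stack.remove(u)
--
--     for n in nodes:
--         if n not in visited:
--             dfs(n)
--
--     return len(in_cycle)
-- ===== SOURCE B (Python) =====
-- def _count_cycle_nodes(nodes, edges):
--     adj = {}
--     for u, v in edges:
--         adj.setdefault(u, []).append(v)
--
--     visited = set()
--     in_cycle = set()
--
--     def dfs(u, path):
--         visited.add(u)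
--         path = path + (u,)
--         for v in adj.get(u, ()):
--             if v not in visited:
--                 dfs(v, path)
--             elif v in path:
--                 in_cycle.update(path[path.index(v):])
--
--     for n in nodes:
--         if n not in visited:
--             dfs(n, ())
--
--     return len(in_cycle)
-- ===== Notes on version B (the rewrite author's own statement) =====
-- stated objective: simpler
-- what changed: B threads the current DFS path as a list and, on a back edge, adds the path suffix from the back-edge target directly, eliminating A's parent dictionary, explicit stack set and pointer-chasing while loop.
import Mathlib
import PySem

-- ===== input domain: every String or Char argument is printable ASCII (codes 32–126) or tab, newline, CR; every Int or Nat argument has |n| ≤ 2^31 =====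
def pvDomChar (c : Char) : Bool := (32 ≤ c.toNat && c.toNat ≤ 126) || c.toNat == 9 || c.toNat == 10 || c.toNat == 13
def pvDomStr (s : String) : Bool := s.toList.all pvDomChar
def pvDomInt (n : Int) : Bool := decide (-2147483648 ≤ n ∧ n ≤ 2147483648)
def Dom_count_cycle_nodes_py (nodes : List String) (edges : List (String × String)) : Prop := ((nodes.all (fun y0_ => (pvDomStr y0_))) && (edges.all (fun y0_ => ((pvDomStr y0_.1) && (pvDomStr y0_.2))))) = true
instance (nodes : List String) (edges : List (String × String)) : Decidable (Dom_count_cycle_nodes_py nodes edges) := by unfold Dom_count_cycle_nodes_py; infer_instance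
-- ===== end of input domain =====

-- B replaces A's parent dictionary + stack set + pointer-chasing while loop by threading the current
-- DFS path as a list and adding the path suffix from the back-edge target directly (objective: simpler).

-- ===== PORT A =====

structure PvStA where
  vis : PySem.Set String
  stk : PySem.Set String
  inc : PySem.Set String
  par : PySem.Dict String String
deriving Repr, DecidableEq

-- the 'while cur != v and cur in parent: in_cycle.add(cur); cur = parent[cur]' loop followed by
-- 'in_cycle.add(cur)'; fuel (always ≥ the chain length at the call site) makes it structural
def pvWalkA : Nat → String → String → PySem.Dict String String → PySem.Set String → PySem.Set String
  | 0, _, cur, _, inc => PySem.Set.add inc cur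
  | w+1, v, cur, par, inc =>
    if cur ≠ v then
      match par.get? cur with
      | some p => pvWalkA w v p par (PySem.Set.add inc cur)
      | none => PySem.Set.add inc cur
    else PySem.Set.add inc cur

mutual
-- def dfs(u): visited.add(u); stack.add(u); for v in adj[u]: …; stack.remove(u)
def pvDfsA (adj : PySem.Dict String (List String)) : Nat → String → PvStA → PvStA
  | 0, _, s => s
  | f+1, u, s =>
    let s1 : PvStA := { s with vis := PySem.Set.add s.vis u, stk := PySem.Set.add s.stk u }
    let s2 := pvLoopA adj f u (adj.getD u []) s1
    -- stack.remove(u): u is always a member of the stack here, so remove = discard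
    { s2 with stk := PySem.Set.discard s2.stk u }
  termination_by f _ _ => (f, 0)
-- the 'for v in adj[u]:' body
def pvLoopA (adj : PySem.Dict String (List String)) : Nat → String → List String → PvStA → PvStA
  | _, _, [], s => s
  | f, u, v :: vs, s =>
    pvLoopA adj f u vs
      (if PySem.Set.contains s.vis v = false then
        pvDfsA adj f v { s with par := s.par.insert v u }
      else if PySem.Set.contains s.stk v = true then
        { s with inc := pvWalkA (s.par.size + 1) v u s.par (PySem.Set.add s.inc v) }
      else s)
  termination_by f _ vs _ => (f, vs.length + 1)
end

def count_cycle_nodes_py (nodes : List String) (edges : List (String × String)) : Int :=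
  -- adj = defaultdict(list); for u, v in edges: adj[u].append(v)
  let adj : PySem.Dict String (List String) :=
    edges.foldl (fun d uv => d.modify uv.1 [] (fun l => l ++ [uv.2])) PySem.Dict.empty
  let s0 : PvStA := ⟨PySem.Set.empty, PySem.Set.empty, PySem.Set.empty, PySem.Dict.empty⟩
  -- for n in nodes: if n not in visited: dfs(n)   (fuel edges.length+1 bounds the recursion depth)
  let s := nodes.foldl
    (fun s n => if PySem.Set.contains s.vis n = false then pvDfsA adj (edges.length + 1) n s else s) s0
  PySem.Set.len s.inc

-- ===== PORT B =====

structure PvStB where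
  vis : PySem.Set String
  inc : PySem.Set String
deriving Repr, DecidableEq

mutual
-- def dfs(u, path): visited.add(u); path = path + (u,); for v in adj.get(u, ()): …
def pvDfsB (adj : PySem.Dict String (List String)) : Nat → String → List String → PvStB → PvStB
  | 0, _, _, s => s
  | f+1, u, path, s =>
    pvLoopB adj f (path ++ [u]) (adj.getD u []) { s with vis := PySem.Set.add s.vis u }
  termination_by f _ _ _ => (f, 0)
-- the 'for v in adj.get(u, ()):' body
def pvLoopB (adj : PySem.Dict String (List String)) : Nat → List String → List String → PvStB → PvStB
  | _, _, [], s => s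
  | f, p, v :: vs, s =>
    pvLoopB adj f p vs
      (if PySem.Set.contains s.vis v = false then
        pvDfsB adj f v p s
      else
        -- elif v in path: in_cycle.update(path[path.index(v):]);  path[i:] with i : Nat is drop i
        match PySem.List.index? p v with
        | some i => { s with inc := PySem.Set.update s.inc (p.drop i) }
        | none => s)
  termination_by f _ vs _ => (f, vs.length + 1)
end

def count_cycle_nodes_py_alt (nodes : List String) (edges : List (String × String)) : Int :=
  let adj : PySem.Dict String (List String) :=
    edges.foldl (fun d uv => d.modify uv.1 [] (fun l => l ++ [uv.2])) PySem.Dict.empty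
  let s0 : PvStB := ⟨PySem.Set.empty, PySem.Set.empty⟩
  let s := nodes.foldl
    (fun s n => if PySem.Set.contains s.vis n = false then pvDfsB adj (edges.length + 1) n [] s else s) s0
  PySem.Set.len s.inc

-- ===== PRECONDITION & SPEC =====
def Spec_count_cycle_nodes_py (nodes : List String) (edges : List (String × String)) (out : Int) : Prop := out = count_cycle_nodes_py_alt nodes edges
instance (nodes : List String) (edges : List (String × String)) (out : Int) : Decidable (Spec_count_cycle_nodes_py nodes edges out) := by unfold Spec_count_cycle_nodes_py; infer_instance

-- ===== CLAIM (what is proved, stated in full; the proofs are below) =====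
def Claim_equal_count_cycle_nodes_py : Prop := ∀ (nodes : List String) (edges : List (String × String)), Dom_count_cycle_nodes_py nodes edges → Spec_count_cycle_nodes_py nodes edges (count_cycle_nodes_py nodes edges)

-- ===== LEMMAS AND PROOFS =====

-- simulation invariant: A's stack (as a list) IS B's path, A's parent entries link consecutive
-- path elements, the two in_cycle sets have the same members, visited sets are identical
def pvInv (p : List String) (a : PvStA) (b : PvStB) : Prop :=
  a.vis = b.vis ∧ a.stk = p ∧ (∀ x, x ∈ a.inc ↔ x ∈ b.inc) ∧
  a.inc.Nodup ∧ b.inc.Nodup ∧ p.Nodup ∧ (∀ x ∈ p, x ∈ a.vis)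

-- number of edge targets not yet visited (fuel measure)
def pvUnvis (edges : List (String × String)) (vis : List String) : Nat :=
  ((edges.map Prod.snd).toFinset.filter (fun x => x ∉ vis)).card

def pvParRel (par : PySem.Dict String String) (x y : String) : Prop := par.get? y = some x

theorem pv_walkA_nodup (fuel : Nat) (v cur : String) (par : PySem.Dict String String)
    (inc : PySem.Set String) (h : inc.Nodup) : (pvWalkA fuel v cur par inc).Nodup := by
  induction fuel generalizing cur inc with
  | zero => simpa [pvWalkA] using PySem.Set.nodup_add inc cur h
  | succ w ih =>
    rw [pvWalkA]
    split_ifs with hcv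
    · cases hg : par.get? cur with
      | some pr => exact ih pr _ (PySem.Set.nodup_add inc cur h)
      | none => exact PySem.Set.nodup_add inc cur h
    · exact PySem.Set.nodup_add inc cur h

theorem pv_walkA_mem (r : List String) (fuel : Nat) (v : String) (q : List String)
    (par : PySem.Dict String String) (inc : PySem.Set String)
    (hc : List.IsChain (pvParRel par) (q ++ v :: r)) (hnd : (q ++ v :: r).Nodup)
    (hf : r.length < fuel) :
    ∀ x, x ∈ pvWalkA fuel v ((v :: r).getLast (by simp)) par inc ↔ x ∈ inc ∨ x ∈ v :: r := by
  induction r using List.reverseRecOn generalizing fuel inc with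
  | nil =>
    intro x
    cases fuel with
    | zero => simp [pvWalkA, PySem.Set.mem_add]
    | succ w => simp [pvWalkA, PySem.Set.mem_add]
  | append_singleton r₀ b ih =>
    intro x
    cases fuel with
    | zero => simp at hf
    | succ w =>
      have hw : r₀.length < w := by simpa using hf
      have hassoc : q ++ v :: (r₀ ++ [b]) = (q ++ v :: r₀) ++ [b] := by simp
      have hnd' : ((q ++ v :: r₀) ++ [b]).Nodup := by rwa [hassoc] at hnd
      have hndr : (v :: (r₀ ++ [b])).Nodup := hnd.of_append_right
      have hbv : b ≠ v := by
        have hv : v ∉ r₀ ++ [b] := (List.nodup_cons.mp hndr).1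
        intro hEq; exact hv (by simp [← hEq])
      have hc' : List.IsChain (pvParRel par) ((q ++ v :: r₀) ++ [b]) := by rwa [hassoc] at hc
      rw [List.isChain_append] at hc'
      obtain ⟨hc1, -, hlink⟩ := hc'
      have hgl : (q ++ v :: r₀).getLast? = some ((v :: r₀).getLast (by simp)) := by
        rw [List.getLast?_append_of_ne_nil q (List.cons_ne_nil v r₀)]
        exact List.getLast?_eq_some_getLast (by simp)
      have hpar : par.get? b = some ((v :: r₀).getLast (by simp)) :=
        hlink _ hgl b rfl
      have h1 : (v :: (r₀ ++ [b])).getLast? = some b := by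
        rw [show v :: (r₀ ++ [b]) = (v :: r₀) ++ [b] by simp]
        exact List.getLast?_concat
      have hlast : ((v :: (r₀ ++ [b])).getLast (by simp)) = b := by
        have h2 := List.getLast?_eq_some_getLast (l := v :: (r₀ ++ [b])) (by simp)
        rw [h1] at h2
        exact (Option.some.inj h2).symm
      rw [hlast, pvWalkA, if_pos hbv, hpar]
      rw [ih w (PySem.Set.add inc b) hc1 hnd'.of_append_left hw x]
      simp [PySem.Set.mem_add]
      tauto

theorem pv_discard_append (p : List String) (u : String) (hu : u ∉ p) :
    PySem.Set.discard (p ++ [u]) u = p := by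
  simp only [PySem.Set.discard, List.filter_append]
  have h1 : List.filter (fun y => !y == u) p = p :=
    List.filter_eq_self.mpr (fun x hx => by simp; exact fun h => hu (h ▸ hx))
  simp [h1]

theorem pv_unvis_mono (edges : List (String × String)) {vis vis' : List String}
    (h : ∀ x ∈ vis, x ∈ vis') : pvUnvis edges vis' ≤ pvUnvis edges vis := by
  apply Finset.card_le_card
  intro x hx
  simp only [Finset.mem_filter] at *
  exact ⟨hx.1, fun hm => hx.2 (h x hm)⟩

theorem pv_unvis_add_lt (edges : List (String × String)) {vis : List String} {v : String}
    (hv : v ∈ edges.map Prod.snd) (hnv : v ∉ vis) :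
    pvUnvis edges (PySem.Set.add vis v) < pvUnvis edges vis := by
  apply Finset.card_lt_card
  rw [Finset.ssubset_iff_of_subset]
  · exact ⟨v, by simp [hv, hnv]⟩
  · intro x hx
    simp only [Finset.mem_filter, PySem.Set.mem_add] at *
    exact ⟨hx.1, fun hm => hx.2 (Or.inl hm)⟩

theorem pv_unvis_le (edges : List (String × String)) (vis : List String) :
    pvUnvis edges vis ≤ edges.length := by
  calc pvUnvis edges vis ≤ (edges.map Prod.snd).toFinset.card := Finset.card_filter_le _ _
    _ ≤ (edges.map Prod.snd).length := List.toFinset_card_le _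
    _ = edges.length := List.length_map ..

theorem pv_adj_aux (l : List (String × String)) :
    ∀ (d : PySem.Dict String (List String)) (u v : String),
      v ∈ (l.foldl (fun d uv => d.modify uv.1 [] (fun l => l ++ [uv.2])) d).getD u [] →
      v ∈ d.getD u [] ∨ v ∈ l.map Prod.snd := by
  induction l with
  | nil => intro d u v h; exact Or.inl h
  | cons a l ih =>
    intro d u v h
    simp only [List.foldl_cons] at h
    rcases ih _ u v h with h' | h'
    · by_cases hu : u = a.1
      · subst hu
        rw [PySem.Dict.getD_modify_self] at h'
        rcases List.mem_append.mp h' with h'' | h''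
        · exact Or.inl h''
        · right; simp at h''; simp [h'']
      · left
        rwa [PySem.Dict.modify, PySem.Dict.getD, PySem.Dict.get?_insert_of_ne _ _ hu] at h'
    · right; rw [List.map_cons]; exact List.mem_cons_of_mem _ h'

theorem pv_adj_targets (edges : List (String × String)) (u v : String)
    (h : v ∈ (edges.foldl (fun d uv => d.modify uv.1 [] (fun l => l ++ [uv.2]))
      PySem.Dict.empty).getD u []) : v ∈ edges.map Prod.snd := by
  rcases pv_adj_aux edges PySem.Dict.empty u v h with h' | h'
  · simp [PySem.Dict.getD, PySem.Dict.empty, PySem.Dict.get?] at h'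
  · exact h'

theorem pv_chain_tail {R : String → String → Prop} :
    ∀ (c : String) (t : List String), List.IsChain R (c :: t) → ∀ b ∈ t, ∃ a, R a b := by
  intro c t
  induction t generalizing c with
  | nil => intro _ b hb; simp at hb
  | cons d t' ih =>
    intro h b hb
    rw [List.isChain_cons_cons] at h
    rcases List.mem_cons.mp hb with hb | hb
    · exact ⟨c, hb ▸ h.1⟩
    · exact ih d h.2 b hb

theorem pv_chain_congr {par par' : PySem.Dict String String} :
    ∀ (l : List String), (∀ y ∈ l, par'.get? y = par.get? y) →
      List.IsChain (pvParRel par) l → List.IsChain (pvParRel par') l := by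
  intro l
  induction l with
  | nil => intro _ _; simp
  | cons a t ih =>
    intro hst h
    cases t with
    | nil => simp
    | cons b t' =>
      rw [List.isChain_cons_cons] at h ⊢
      refine ⟨?_, ih (fun y hy => hst y (List.mem_cons_of_mem a hy)) h.2⟩
      show par'.get? b = some a
      rw [hst b (by simp)]
      exact h.1

-- elements after the head of a chain are keys of the dict, bounding chain length by the dict size
theorem pv_suffix_le_size (par : PySem.Dict String String) (q : List String) (v : String)
    (r : List String) (hc : List.IsChain (pvParRel par) (q ++ v :: r))
    (hnd : (q ++ v :: r).Nodup) : r.length ≤ par.size := by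
  have hmem : ∀ b ∈ r, b ∈ par.keys := by
    intro b hb
    have hex : ∃ a, pvParRel par a b := by
      cases q with
      | nil => exact pv_chain_tail v r hc b hb
      | cons c q' => exact pv_chain_tail c (q' ++ v :: r) (by simpa using hc) b (by simp [hb])
    obtain ⟨x, hx⟩ := hex
    by_contra hk
    rw [← PySem.Dict.get?_eq_none_iff_not_mem_keys] at hk
    rw [pvParRel, hk] at hx
    simp at hx
  have hnr : r.Nodup := (List.nodup_cons.mp hnd.of_append_right).2
  calc r.length = r.toFinset.card := (List.toFinset_card_of_nodup hnr).symm
    _ ≤ par.keys.toFinset.card :=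
        Finset.card_le_card (fun x hx => List.mem_toFinset.mpr (hmem x (List.mem_toFinset.mp hx)))
    _ ≤ par.keys.length := List.toFinset_card_le _
    _ = par.size := by simp [PySem.Dict.keys, PySem.Dict.size]

-- statement of the dfs-level simulation at fuel f
def pvDfsSim (edges : List (String × String)) (adj : PySem.Dict String (List String)) (f : Nat) : Prop :=
  ∀ (u : String) (p : List String) (a : PvStA) (b : PvStB),
    pvInv p a b → List.IsChain (pvParRel a.par) (p ++ [u]) → u ∉ a.vis →
    pvUnvis edges (PySem.Set.add a.vis u) < f →
    pvInv p (pvDfsA adj f u a) (pvDfsB adj f u p b) ∧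
    (∀ x ∈ PySem.Set.add a.vis u, x ∈ (pvDfsA adj f u a).vis) ∧
    (∀ x ∈ PySem.Set.add a.vis u, (pvDfsA adj f u a).par.get? x = a.par.get? x)

-- statement of the neighbour-loop simulation at fuel f
def pvLoopSim (edges : List (String × String)) (adj : PySem.Dict String (List String)) (f : Nat) : Prop :=
  ∀ (vs : List String) (u : String) (p : List String) (a : PvStA) (b : PvStB),
    pvInv (p ++ [u]) a b → List.IsChain (pvParRel a.par) (p ++ [u]) →
    (∀ v ∈ vs, v ∈ edges.map Prod.snd) → pvUnvis edges a.vis ≤ f →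
    pvInv (p ++ [u]) (pvLoopA adj f u vs a) (pvLoopB adj f (p ++ [u]) vs b) ∧
    List.IsChain (pvParRel (pvLoopA adj f u vs a).par) (p ++ [u]) ∧
    (∀ x ∈ a.vis, x ∈ (pvLoopA adj f u vs a).vis) ∧
    (∀ x ∈ a.vis, (pvLoopA adj f u vs a).par.get? x = a.par.get? x)

theorem pv_loopSim (edges : List (String × String)) (adj : PySem.Dict String (List String))
    (f : Nat) (hd : pvDfsSim edges adj f) : pvLoopSim edges adj f := by
  intro vs
  induction vs with
  | nil =>
    intro u p a b hInv hch _ _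
    simp only [pvLoopA, pvLoopB]
    exact ⟨hInv, hch, fun _ h => h, fun _ _ => trivial⟩
  | cons v vs ih =>
    intro u p a b hInv hch htg hfu
    have htg' : ∀ x ∈ vs, x ∈ edges.map Prod.snd :=
      fun x hx => htg x (List.mem_cons_of_mem _ hx)
    obtain ⟨hvis, hstk, hinc, hndA, hndB, hndp, hpvis⟩ := hInv
    simp only [pvLoopA, pvLoopB]
    by_cases hvv : v ∈ a.vis
    · -- v already visited: the 'v not in visited' branch is not taken on either side
      have hca : ¬ (PySem.Set.contains a.vis v = false) := by
        rw [(PySem.Set.contains_iff a.vis v).mpr hvv]; simp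
      have hcb : ¬ (PySem.Set.contains b.vis v = false) := by rw [← hvis]; exact hca
      rw [if_neg hca, if_neg hcb]
      by_cases hvp : v ∈ p ++ [u]
      · -- back edge: v is on the stack / path
        have hcs : PySem.Set.contains a.stk v = true := by
          rw [hstk]; exact (PySem.Set.contains_iff _ _).mpr hvp
        rw [if_pos hcs]
        obtain ⟨i, hi⟩ := Option.isSome_iff_exists.mp
          ((PySem.List.index?_isSome_iff (p ++ [u]) v).mpr hvp)
        rw [hi]
        obtain ⟨pre, suf, hdec, hlen, hvpre⟩ := (PySem.List.index?_eq_some_iff _ _ _).mp hi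
        have hdrop : (p ++ [u]).drop i = v :: suf := by
          rw [hdec, ← hlen]; exact List.drop_left
        have hu1 : (p ++ [u]).getLast? = some u := List.getLast?_concat
        have hu2 : (p ++ [u]).getLast? = some ((v :: suf).getLast (by simp)) := by
          rw [hdec, List.getLast?_append_of_ne_nil pre (List.cons_ne_nil v suf)]
          exact List.getLast?_eq_some_getLast (by simp)
        have huv : u = (v :: suf).getLast (by simp) := by
          rw [hu1] at hu2; exact Option.some.inj hu2
        have hc' : List.IsChain (pvParRel a.par) (pre ++ v :: suf) := hdec ▸ hch
        have hnd' : (pre ++ v :: suf).Nodup := hdec ▸ hndp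
        have hsz : suf.length < a.par.size + 1 :=
          Nat.lt_succ_of_le (pv_suffix_le_size a.par pre v suf hc' hnd')
        have hw := pv_walkA_mem suf (a.par.size + 1) v pre a.par
          (PySem.Set.add a.inc v) hc' hnd' hsz
        rw [← huv] at hw
        have hincW : ∀ x,
            x ∈ pvWalkA (a.par.size + 1) v u a.par (PySem.Set.add a.inc v) ↔
            x ∈ PySem.Set.update b.inc ((p ++ [u]).drop i) := by
          intro x
          rw [hw x, PySem.Set.mem_update, PySem.Set.mem_add, hdrop]
          have hx := hinc x
          constructor
          · rintro ((h | h) | h)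
            · exact Or.inl (hx.mp h)
            · exact Or.inr (by simp [h])
            · exact Or.inr h
          · rintro (h | h)
            · exact Or.inl (Or.inl (hx.mpr h))
            · exact Or.inr h
        have hndAW : (pvWalkA (a.par.size + 1) v u a.par (PySem.Set.add a.inc v)).Nodup :=
          pv_walkA_nodup _ _ _ _ _ (PySem.Set.nodup_add _ _ hndA)
        have hndBW : (PySem.Set.update b.inc ((p ++ [u]).drop i)).Nodup :=
          PySem.Set.nodup_update _ _ hndB
        exact ih u p
          { a with inc := pvWalkA (a.par.size + 1) v u a.par (PySem.Set.add a.inc v) }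
          { b with inc := PySem.Set.update b.inc ((p ++ [u]).drop i) }
          ⟨hvis, hstk, hincW, hndAW, hndBW, hndp, hpvis⟩ hch htg' hfu
      · -- visited but not on the stack: both sides leave the state unchanged
        have hcs : ¬ (PySem.Set.contains a.stk v = true) := by
          rw [hstk]; intro h; exact hvp ((PySem.Set.contains_iff _ _).mp h)
        rw [if_neg hcs, (PySem.List.index?_eq_none_iff (p ++ [u]) v).mpr hvp]
        exact ih u p a b ⟨hvis, hstk, hinc, hndA, hndB, hndp, hpvis⟩ hch htg' hfu
    · -- v unvisited: both sides recurse into the DFS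
      have hca : PySem.Set.contains a.vis v = false := by
        rw [← Bool.not_eq_true, PySem.Set.contains_iff]; exact hvv
      have hcb : PySem.Set.contains b.vis v = false := by rw [← hvis]; exact hca
      rw [if_pos hca, if_pos hcb]
      have hstab1 : ∀ y ∈ p ++ [u], (a.par.insert v u).get? y = a.par.get? y := by
        intro y hy
        exact PySem.Dict.get?_insert_of_ne _ _ (fun hEq => hvv (hEq ▸ hpvis y hy))
      have hch1 : List.IsChain (pvParRel (a.par.insert v u)) (p ++ [u]) :=
        pv_chain_congr _ hstab1 hch
      have hchv : List.IsChain (pvParRel (a.par.insert v u)) ((p ++ [u]) ++ [v]) := by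
        rw [List.isChain_append]
        refine ⟨hch1, by simp, ?_⟩
        intro x hx y hy
        simp only [List.head?_cons, Option.mem_def, Option.some.injEq] at hy
        rw [List.getLast?_concat, Option.mem_def, Option.some.injEq] at hx
        subst hx; subst hy
        exact PySem.Dict.get?_insert_self _ _ _
      have hlt : pvUnvis edges (PySem.Set.add a.vis v) < f :=
        lt_of_lt_of_le (pv_unvis_add_lt edges (htg v (List.mem_cons_self ..)) hvv) hfu
      obtain ⟨hInv₂, hgrow₂, hstab₂⟩ := hd v (p ++ [u]) { a with par := a.par.insert v u } b
        ⟨hvis, hstk, hinc, hndA, hndB, hndp, hpvis⟩ hchv hvv hlt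
      have hmemv : ∀ x ∈ a.vis, x ∈ PySem.Set.add a.vis v := by
        intro x hx; rw [PySem.Set.mem_add]; exact Or.inl hx
      have hch₂ : List.IsChain
          (pvParRel (pvDfsA adj f v { a with par := a.par.insert v u }).par) (p ++ [u]) := by
        refine pv_chain_congr _ (fun y hy => ?_) hch
        rw [hstab₂ y (hmemv y (hpvis y hy))]
        exact hstab1 y hy
      have hfu₂ : pvUnvis edges (pvDfsA adj f v { a with par := a.par.insert v u }).vis ≤ f :=
        le_trans (pv_unvis_mono edges (fun x hx => hgrow₂ x (hmemv x hx))) hfu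
      obtain ⟨hI, hC, hG, hS⟩ := ih u p _ _ hInv₂ hch₂ htg' hfu₂
      refine ⟨hI, hC, ?_, ?_⟩
      · intro x hx
        exact hG x (hgrow₂ x (hmemv x hx))
      · intro x hx
        rw [hS x (hgrow₂ x (hmemv x hx)), hstab₂ x (hmemv x hx)]
        exact PySem.Dict.get?_insert_of_ne _ _ (fun hEq => hvv (hEq ▸ hx))

theorem pv_dfsSim (edges : List (String × String)) (adj : PySem.Dict String (List String))
    (hadj : ∀ u v, v ∈ adj.getD u [] → v ∈ edges.map Prod.snd)
    (f : Nat) : pvDfsSim edges adj f := by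
  induction f with
  | zero =>
    intro u p a b _ _ _ hfu
    exact absurd hfu (Nat.not_lt_zero _)
  | succ f ihf =>
    have hl := pv_loopSim edges adj f ihf
    intro u p a b hInv hch hu hfu
    obtain ⟨hvis, hstk, hinc, hndA, hndB, hndp, hpvis⟩ := hInv
    have hup : u ∉ p := fun h => hu (hpvis u h)
    simp only [pvDfsA, pvDfsB]
    have hstkadd : PySem.Set.add a.stk u = p ++ [u] := by
      rw [hstk]; exact PySem.Set.add_of_not_mem hup
    have hnd1 : (p ++ [u]).Nodup := by
      rw [List.nodup_append]
      refine ⟨hndp, List.nodup_singleton u, ?_⟩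
      simp
      exact fun x hx hxu => hup (hxu ▸ hx)
    have hsub1 : ∀ x ∈ p ++ [u], x ∈ PySem.Set.add a.vis u := by
      intro x hx
      rw [PySem.Set.mem_add]
      rcases List.mem_append.mp hx with h | h
      · exact Or.inl (hpvis x h)
      · exact Or.inr (by simpa using h)
    have hfu' : pvUnvis edges (PySem.Set.add a.vis u) ≤ f := Nat.lt_succ_iff.mp hfu
    obtain ⟨⟨hvis2, hstk2, hinc2, hndA2, hndB2, hnd2, hsub2⟩, hC2, hG2, hS2⟩ :=
      hl (adj.getD u []) u p
        { a with vis := PySem.Set.add a.vis u, stk := PySem.Set.add a.stk u }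
        { b with vis := PySem.Set.add b.vis u }
        ⟨by simp [hvis], by simpa using hstkadd, hinc, hndA, hndB, hnd1, hsub1⟩
        hch (fun v hv => hadj u v hv) hfu'
    refine ⟨⟨hvis2, ?_, hinc2, hndA2, hndB2, hndp, ?_⟩, ?_, ?_⟩
    · show PySem.Set.discard _ u = p
      rw [hstk2]
      exact pv_discard_append p u hup
    · intro x hx
      exact hG2 x (hsub1 x (List.mem_append_left _ hx))
    · intro x hx
      exact hG2 x hx
    · intro x hx
      exact hS2 x hx

-- ===== VERDICT (by name: the statement is the Claim_ definition above) =====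
theorem count_cycle_nodes_py_spec : Claim_equal_count_cycle_nodes_py := by
  intro nodes edges _
  unfold Spec_count_cycle_nodes_py count_cycle_nodes_py count_cycle_nodes_py_alt
  set adj := edges.foldl (fun d uv => d.modify uv.1 [] (fun l => l ++ [uv.2]))
    PySem.Dict.empty with hadjdef
  have hadj : ∀ u v, v ∈ adj.getD u [] → v ∈ edges.map Prod.snd :=
    fun u v h => pv_adj_targets edges u v h
  suffices h : ∀ (ns : List String) (a : PvStA) (b : PvStB), pvInv [] a b →
      pvInv []
        (ns.foldl (fun s n => if PySem.Set.contains s.vis n = false then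
          pvDfsA adj (edges.length + 1) n s else s) a)
        (ns.foldl (fun s n => if PySem.Set.contains s.vis n = false then
          pvDfsB adj (edges.length + 1) n [] s else s) b) by
    obtain ⟨_, _, hinc, hndA, hndB, _, _⟩ := h nodes
      ⟨PySem.Set.empty, PySem.Set.empty, PySem.Set.empty, PySem.Dict.empty⟩
      ⟨PySem.Set.empty, PySem.Set.empty⟩
      ⟨rfl, rfl, fun _ => Iff.rfl, List.nodup_nil, List.nodup_nil, List.nodup_nil,
        fun x hx => absurd hx List.not_mem_nil⟩
    simp only [PySem.Set.len]
    exact congrArg _ (((List.perm_ext_iff_of_nodup hndA hndB).mpr hinc).length_eq)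
  intro ns
  induction ns with
  | nil => intro a b h; exact h
  | cons n ns ih =>
    intro a b h
    obtain ⟨hvis, hstk, hinc, hndA, hndB, hndp, hpvis⟩ := h
    simp only [List.foldl_cons]
    by_cases hn : n ∈ a.vis
    · have hca : ¬ (PySem.Set.contains a.vis n = false) := by
        rw [(PySem.Set.contains_iff a.vis n).mpr hn]; simp
      have hcb : ¬ (PySem.Set.contains b.vis n = false) := by rw [← hvis]; exact hca
      rw [if_neg hca, if_neg hcb]
      exact ih a b ⟨hvis, hstk, hinc, hndA, hndB, hndp, hpvis⟩
    · have hca : PySem.Set.contains a.vis n = false := by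
        rw [← Bool.not_eq_true, PySem.Set.contains_iff]; exact hn
      have hcb : PySem.Set.contains b.vis n = false := by rw [← hvis]; exact hca
      rw [if_pos hca, if_pos hcb]
      have hchain : List.IsChain (pvParRel a.par) ([] ++ [n]) := by simp
      have hfu : pvUnvis edges (PySem.Set.add a.vis n) < edges.length + 1 :=
        Nat.lt_succ_of_le (pv_unvis_le edges _)
      obtain ⟨hI, -, -⟩ := pv_dfsSim edges adj hadj (edges.length + 1) n [] a b
        ⟨hvis, hstk, hinc, hndA, hndB, hndp, hpvis⟩ hchain hn hfu
      exact ih _ _ hI
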